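-- pv_equiv track=rewrite | github.com/DanielSauve101/techdegree-project-11 | pug_or_ugh_v2/backend/pugorugh/views.py | preferred_dog_age
-- ===== SOURCE A (Python) =====
-- def preferred_dog_age(preferred_age):
--     age_groups = []
--     b = [b for b in range(1, 13)]
--     y = [y for y in range(13, 31)]
--     a = [a for a in range(31, 121)]
--     s = [s for s in range(121, 240)]
--
--     if 'b' in preferred_age:
--         age_groups.extend(b)
--     if 'y' in preferred_age:
--         age_groups.extend(y)
--     if 'a' in preferred_age:
--         age_groups.extend(a)
--     if 's' in preferred_age:
--         age_groups.extend(s)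
--
--     return age_groups
-- ===== SOURCE B (Python) =====
-- def preferred_dog_age(preferred_age):
--     result = []
--     for i in range(1, 240):
--         if i <= 12:
--             letter = 'b'
--         elif i <= 30:
--             letter = 'y'
--         elif i <= 120:
--             letter = 'a'
--         else:
--             letter = 's'
--         if letter in preferred_age:
--             result.append(i)
--     return result
-- ===== Notes on version B (the rewrite author's own statement) =====
-- stated objective: alternative
-- what changed: Replaces the four precomputed range blocks with a single pass over 1..239 that classifies each month by boundary and appends it only when its group letter occurs in preferred_age.
import Mathlib
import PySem

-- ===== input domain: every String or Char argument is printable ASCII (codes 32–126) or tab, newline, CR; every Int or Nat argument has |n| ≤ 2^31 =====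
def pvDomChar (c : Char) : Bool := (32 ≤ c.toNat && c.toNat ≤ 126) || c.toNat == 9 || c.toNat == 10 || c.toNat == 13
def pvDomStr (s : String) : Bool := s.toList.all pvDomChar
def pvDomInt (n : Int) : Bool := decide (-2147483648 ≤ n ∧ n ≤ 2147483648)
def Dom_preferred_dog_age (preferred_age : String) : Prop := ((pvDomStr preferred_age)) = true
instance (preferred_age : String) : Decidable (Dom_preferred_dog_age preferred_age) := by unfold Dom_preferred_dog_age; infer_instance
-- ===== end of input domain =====

-- B replaces A's four precomputed range blocks with one classifying pass over 1..239 (alternative decomposition, same cost).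

-- ===== PORT A =====
def preferred_dog_age (preferred_age : String) : List Int :=
  let age_groups : List Int := []
  let b := PySem.List.pyRange 1 13 1
  let y := PySem.List.pyRange 13 31 1
  let a := PySem.List.pyRange 31 121 1
  let s := PySem.List.pyRange 121 240 1
  let age_groups := if PySem.Str.isIn "b" preferred_age then age_groups ++ b else age_groups
  let age_groups := if PySem.Str.isIn "y" preferred_age then age_groups ++ y else age_groups
  let age_groups := if PySem.Str.isIn "a" preferred_age then age_groups ++ a else age_groups
  let age_groups := if PySem.Str.isIn "s" preferred_age then age_groups ++ s else age_groups
  age_groups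

-- ===== PORT B =====
def preferred_dog_age_alt (preferred_age : String) : List Int :=
  (PySem.List.pyRange 1 240 1).foldl
    (fun result i =>
      let letter : String :=
        if i ≤ 12 then "b" else if i ≤ 30 then "y" else if i ≤ 120 then "a" else "s"
      if PySem.Str.isIn letter preferred_age then result ++ [i] else result)
    []

-- ===== PRECONDITION & SPEC =====
def Spec_preferred_dog_age (preferred_age : String) (out : List Int) : Prop := out = preferred_dog_age_alt preferred_age
instance (preferred_age : String) (out : List Int) : Decidable (Spec_preferred_dog_age preferred_age out) := by unfold Spec_preferred_dog_age; infer_instance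

-- ===== CLAIM (what is proved, stated in full; the proofs are below) =====
def Claim_equal_preferred_dog_age : Prop := ∀ (preferred_age : String), Dom_preferred_dog_age preferred_age → Spec_preferred_dog_age preferred_age (preferred_dog_age preferred_age)

-- ===== LEMMAS AND PROOFS =====

-- the classification B applies to each month
def pdaLetter (i : Int) : String :=
  if i ≤ 12 then "b" else if i ≤ 30 then "y" else if i ≤ 120 then "a" else "s"

-- over a list whose elements all classify to the same letter L, B's loop body
-- degenerates to A's "extend if the letter is preferred"
theorem pda_fold_const (pa L : String) (l : List Int) (acc : List Int)
    (h : ∀ i ∈ l, pdaLetter i = L) :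
    l.foldl (fun result i =>
        if PySem.Str.isIn (pdaLetter i) pa then result ++ [i] else result) acc
      = if PySem.Str.isIn L pa then acc ++ l else acc := by
  induction l generalizing acc with
  | nil => simp
  | cons x t ih =>
    have hx : pdaLetter x = L := h x (List.mem_cons_self)
    have ht : ∀ i ∈ t, pdaLetter i = L := fun i hi => h i (List.mem_cons_of_mem _ hi)
    simp only [List.foldl_cons, hx, ih _ ht]
    by_cases hL : PySem.Chars.isIn L.toList pa.toList = true <;> simp [hL]

theorem preferred_dog_age_spec : Claim_equal_preferred_dog_age := by
  intro pa _
  unfold Spec_preferred_dog_age preferred_dog_age preferred_dog_age_alt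
  have hsplit : PySem.List.pyRange 1 240 1
      = PySem.List.pyRange 1 13 1 ++ PySem.List.pyRange 13 31 1
        ++ PySem.List.pyRange 31 121 1 ++ PySem.List.pyRange 121 240 1 := by
    rw [PySem.List.pyRange_one_append 1 13 240 (by norm_num) (by norm_num),
        PySem.List.pyRange_one_append 13 31 240 (by norm_num) (by norm_num),
        PySem.List.pyRange_one_append 31 121 240 (by norm_num) (by norm_num)]
    simp [List.append_assoc]
  have hb : ∀ i ∈ PySem.List.pyRange 1 13 1, pdaLetter i = "b" := by
    intro i hi
    rw [PySem.List.mem_pyRange_one] at hi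
    simp only [pdaLetter]
    rw [if_pos (by omega)]
  have hy : ∀ i ∈ PySem.List.pyRange 13 31 1, pdaLetter i = "y" := by
    intro i hi
    rw [PySem.List.mem_pyRange_one] at hi
    simp only [pdaLetter]
    rw [if_neg (by omega), if_pos (by omega)]
  have ha : ∀ i ∈ PySem.List.pyRange 31 121 1, pdaLetter i = "a" := by
    intro i hi
    rw [PySem.List.mem_pyRange_one] at hi
    simp only [pdaLetter]
    rw [if_neg (by omega), if_neg (by omega), if_pos (by omega)]
  have hs : ∀ i ∈ PySem.List.pyRange 121 240 1, pdaLetter i = "s" := by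
    intro i hi
    rw [PySem.List.mem_pyRange_one] at hi
    simp only [pdaLetter]
    rw [if_neg (by omega), if_neg (by omega), if_neg (by omega)]
  show _ = (PySem.List.pyRange 1 240 1).foldl
      (fun result i =>
        if PySem.Str.isIn (pdaLetter i) pa then result ++ [i] else result) []
  rw [hsplit, List.foldl_append, List.foldl_append, List.foldl_append,
      pda_fold_const pa "b" _ _ hb, pda_fold_const pa "y" _ _ hy,
      pda_fold_const pa "a" _ _ ha, pda_fold_const pa "s" _ _ hs]
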